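-- pv_equiv track=rewrite | github.com/eun-byeol/algorithm | implementation/후보키.py | solution
-- ===== SOURCE A (Python) =====
-- from itertools import combinations
--
-- def is_minimality(combi, visited):
--     for v in visited:
--         if len(v - set(combi)) == 0:
--             return False
--     return True
--
-- def is_uniqueness(combi, relation, N):
--     data = set()
--     for r in relation:
--         value = []
--         for i in combi:
--             value.append(r[i])
--         data.add(tuple(value))
--     return len(data) == N
--
-- def solution(relation):
--     answer = 0
--     N = len(relation)
--     M = len(relation[0])
--     visited = []
--     for num in range(1, M+1):
--         for combi in combinations(range(M), num):
--             if not is_minimality(combi, visited):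
--                 continue
--             if is_uniqueness(combi, relation, N):
--                 visited.append(set(combi))
--                 answer += 1
--     return answer
-- ===== SOURCE B (Python) =====
-- def solution(relation):
--     N = len(relation)
--     M = len(relation[0])
--     # For each pair of rows, the bitmask of columns on which the two rows differ.
--     diffs = []
--     for a in range(N):
--         for b in range(a + 1, N):
--             d = 0
--             for i in range(M):
--                 if relation[a][i] != relation[b][i]:
--                     d |= 1 << i
--             diffs.append(d)
--
--     def unique(mask):
--         # a column set separates every pair of rows iff it hits each difference mask
--         for d in diffs:
--             if mask & d == 0:
--                 return False
--         return True
--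
--     count = 0
--     for mask in range(1, 1 << M):
--         if not unique(mask):
--             continue
--         # uniqueness is monotone, so minimality only needs the one-bit-removed subsets
--         minimal = True
--         for i in range(M):
--             if (mask >> i) & 1:
--                 sub = mask ^ (1 << i)
--                 if sub != 0 and unique(sub):
--                     minimal = False
--                     break
--         if minimal:
--             count += 1
--     return count
-- ===== Notes on version B (the rewrite author's own statement) =====
-- stated objective: alternative
-- what changed: B precomputes for every pair of rows the bitmask of columns on which they differ, decides uniqueness of a column set by checking it intersects every such difference mask (no row projections, no sets of tuples), and decides minimality locally by dropping one column at a time (uniqueness is monotone), instead of A's size-graded combinations enumeration pruned against a stored list of found keys.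
import Mathlib
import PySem

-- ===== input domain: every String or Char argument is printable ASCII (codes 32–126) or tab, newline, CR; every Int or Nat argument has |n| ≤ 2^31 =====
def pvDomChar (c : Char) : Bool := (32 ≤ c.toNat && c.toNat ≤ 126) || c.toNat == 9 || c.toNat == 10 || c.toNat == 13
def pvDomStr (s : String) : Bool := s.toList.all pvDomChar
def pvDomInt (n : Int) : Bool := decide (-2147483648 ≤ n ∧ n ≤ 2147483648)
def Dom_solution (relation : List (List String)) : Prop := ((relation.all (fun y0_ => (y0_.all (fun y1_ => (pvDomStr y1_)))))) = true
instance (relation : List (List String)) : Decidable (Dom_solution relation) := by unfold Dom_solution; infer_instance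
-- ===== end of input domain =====

-- B replaces A's combinations-by-size enumeration (projection sets + stored-keys pruning) by
-- pairwise row-difference bitmasks with a local one-bit-removal minimality test; returns agree on Pre_.

-- ===== PORT A =====
def isMinimality (combi : List Int) (visited : List (PySem.Set Int)) : Bool :=
  visited.all (fun v => !(PySem.Set.len (PySem.Set.diff v (PySem.Set.ofList combi)) == 0))

def isUniqueness (combi : List Int) (relation : List (List String)) (N : Int) : Bool :=
  let data := relation.foldl (fun data r =>
    PySem.Set.add data (combi.foldl (fun value i => value ++ [PySem.List.pyGetD r i ""]) [])) PySem.Set.empty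
  PySem.Set.len data == N

def solution (relation : List (List String)) : Int :=
  let N : Int := relation.length
  let M : Int := (PySem.List.pyGetD relation 0 []).length
  let st := (PySem.List.pyRange 1 (M+1)).foldl (fun st num =>
    (PySem.List.combinations (PySem.List.pyRange 0 M) num.toNat).foldl (fun st combi =>
      if !(isMinimality combi st.2) then st
      else if isUniqueness combi relation N then (st.1 + 1, st.2 ++ [PySem.Set.ofList combi]) else st)
      st) ((0 : Int), ([] : List (PySem.Set Int)))
  st.1

-- ===== PORT B =====
-- inner loop of the pair scan: bitmask of the columns on which rows a and b differ
def diffNat (relation : List (List String)) (M a b : Nat) : Nat :=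
  (List.range M).foldl (fun d i =>
    if (relation.getD a []).getD i "" != (relation.getD b []).getD i "" then d ||| (1 <<< i) else d) 0

def diffsOf (relation : List (List String)) (N M : Nat) : List Nat :=
  (List.range N).foldl (fun diffs a =>
    (List.range' (a+1) (N - (a+1))).foldl (fun diffs b => diffs ++ [diffNat relation M a b]) diffs) []

def uniqueB (diffs : List Nat) (mask : Nat) : Bool :=
  diffs.all (fun d => !(mask &&& d == 0))

def solution_alt (relation : List (List String)) : Int :=
  let N := relation.length
  let M := (relation.headD []).length
  let diffs := diffsOf relation N M
  (List.range' 1 (2^M - 1)).foldl (fun count mask =>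
    if !(uniqueB diffs mask) then count
    else if (List.range M).all (fun i =>
        if (mask >>> i) &&& 1 == 1 then
          !(mask ^^^ (1 <<< i) != 0 && uniqueB diffs (mask ^^^ (1 <<< i)))
        else true) then count + 1
    else count) (0 : Int)

-- ===== PRECONDITION & SPEC =====
-- Pre_ excludes exactly the inputs where Python A raises (IndexError): the empty relation
-- (relation[0]) and relations with a row shorter than the first row (r[i] for i < M).
def Pre_solution (relation : List (List String)) : Prop :=
  relation ≠ [] ∧ ∀ r ∈ relation, (relation.headD []).length ≤ r.length
instance (relation : List (List String)) : Decidable (Pre_solution relation) := by unfold Pre_solution; infer_instance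

def pvWitness_solution : List (List String) := [["a", "x"], ["b", "x"]]

def Spec_solution (relation : List (List String)) (out : Int) : Prop := out = solution_alt relation
instance (relation : List (List String)) (out : Int) : Decidable (Spec_solution relation out) := by unfold Spec_solution; infer_instance

-- ===== CLAIM (what is proved, stated in full; the proofs are below) =====
def Claim_equal_solution : Prop := ∀ (relation : List (List String)), Dom_solution relation → Pre_solution relation → Spec_solution relation (solution relation)

-- ===== LEMMAS AND PROOFS =====

-- The common abstraction: subsets of columns as `Finset Int`, a uniqueness predicate `uniqR`,
-- and the count of minimal unique subsets both ports compute.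

def castRange (M : Nat) : List Int := (List.range M).map (fun i : Nat => (i : Int))

def projR (M : Nat) (S : Finset Int) (r : List String) : List String :=
  ((castRange M).filter (fun i => decide (i ∈ S))).map (fun i => PySem.List.pyGetD r i "")

def uniqR (relation : List (List String)) (M : Nat) (S : Finset Int) : Bool :=
  decide (relation.map (projR M S)).Nodup

def goodB (uniq : Finset Int → Bool) (S : Finset Int) : Bool :=
  uniq S && decide (∀ T ∈ S.powerset, T ≠ S → T ≠ ∅ → uniq T = false)

def absStep (uniq : Finset Int → Bool) (st : Int × List (Finset Int)) (S : Finset Int) : Int × List (Finset Int) :=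
  if (∀ v ∈ st.2, ¬ v ⊆ S) ∧ uniq S = true then (st.1 + 1, st.2 ++ [S]) else st

def maskSet (M : Nat) (mask : Nat) : Finset Int :=
  (((List.range M).filter (fun i => (mask >>> i) &&& 1 == 1)).map (fun i : Nat => (i : Int))).toFinset

def maskOf (M : Nat) (T : Finset Int) : Nat :=
  (((List.range M).filter (fun i : Nat => decide ((i : Int) ∈ T))).map (fun i : Nat => (2:Nat)^i)).sum

def bigA (M : Nat) : List (List Int) :=
  (PySem.List.pyRange 1 ((M : Int) + 1)).flatMap (fun num => PySem.List.combinations (castRange M) num.toNat)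

def listA (M : Nat) : List (Finset Int) := (bigA M).map List.toFinset

def listB (M : Nat) : List (Finset Int) := (List.range' 1 (2^M - 1)).map (maskSet M)

-- generic simulation of a fold by a fold over the mapped list
lemma foldl_sim {σ τ α β : Type} (f : σ → α → σ) (g : τ → β → τ) (m : α → β) (R : σ → τ → Prop) :
    ∀ (L : List α) (s : σ) (t : τ), R s t → (∀ c ∈ L, ∀ s t, R s t → R (f s c) (g t (m c))) →
      R (L.foldl f s) ((L.map m).foldl g t) := by
  intro L
  induction L with
  | nil => intro s t h _; exact h
  | cons c L ih =>
    intro s t h hstep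
    exact ih _ _ (hstep c (by simp) s t h) (fun c' hc' => hstep c' (by simp [hc']))

lemma exists_min (uniq : Finset Int → Bool) :
    ∀ S : Finset Int, uniq S = true → S ≠ ∅ → ∃ T, T ⊆ S ∧ T ≠ ∅ ∧ goodB uniq T = true := by
  intro S
  induction S using Finset.strongInduction with
  | _ S ih =>
    intro hS hne
    by_cases hg : goodB uniq S = true
    · exact ⟨S, Finset.Subset.refl S, hne, hg⟩
    · have hex : ∃ T ∈ S.powerset, T ≠ S ∧ T ≠ ∅ ∧ uniq T = true := by
        unfold goodB at hg
        simp only [hS, Bool.true_and, decide_eq_true_eq] at hg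
        push Not at hg
        obtain ⟨T, hT1, hT2, hT3, hT4⟩ := hg
        exact ⟨T, hT1, hT2, Finset.nonempty_iff_ne_empty.mp hT3, by simpa using hT4⟩
      obtain ⟨T, hTp, hTne', hTne, hTu⟩ := hex
      have hss : T ⊂ S := Finset.ssubset_iff_subset_ne.mpr ⟨Finset.mem_powerset.mp hTp, hTne'⟩
      obtain ⟨T', h1, h2, h3⟩ := ih T hss hTu hTne
      exact ⟨T', h1.trans hss.subset, h2, h3⟩

lemma abs_fold (uniq : Finset Int → Bool) :
    ∀ (L pre : List (Finset Int)) (n : Int),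
      (pre ++ L).Nodup →
      (∀ S ∈ pre ++ L, S ≠ ∅) →
      (∀ (k : Nat) (hk : k < L.length), ∀ T, T ⊂ L[k] → T ≠ ∅ → T ∈ pre ++ L.take k) →
      L.foldl (absStep uniq) (n, pre.filter (goodB uniq)) =
        (n + ((L.filter (goodB uniq)).length : Int), (pre ++ L).filter (goodB uniq)) := by
  intro L
  induction L with
  | nil => intro pre n _ _ _; simp
  | cons S L ih =>
    intro pre n hnd hne hcl
    have hSpre : S ∉ pre := by
      intro hmem
      exact ((List.nodup_append.mp hnd).2.2 S hmem S (by simp)) rfl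
    have hcl0 : ∀ T, T ⊂ S → T ≠ ∅ → T ∈ pre := by
      have h := hcl 0 (by simp)
      simpa using h
    have hkey : ((∀ v ∈ pre.filter (goodB uniq), ¬ v ⊆ S) ∧ uniq S = true) ↔ goodB uniq S = true := by
      constructor
      · rintro ⟨hmin, hu⟩
        unfold goodB
        simp only [hu, Bool.true_and, decide_eq_true_eq]
        intro T hTp hTS hTne
        by_contra hTu'
        have hTu : uniq T = true := by simpa using hTu'
        have hss : T ⊂ S := Finset.ssubset_iff_subset_ne.mpr ⟨Finset.mem_powerset.mp hTp, hTS⟩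
        obtain ⟨T', hT'sub, hT'ne, hT'good⟩ := exists_min uniq T hTu hTne
        have hT'pre : T' ∈ pre := hcl0 T' (Finset.ssubset_of_subset_of_ssubset hT'sub hss) hT'ne
        exact hmin T' (List.mem_filter.mpr ⟨hT'pre, hT'good⟩) (hT'sub.trans hss.subset)
      · intro hg
        have hu : uniq S = true := Bool.and_elim_left (by unfold goodB at hg; exact hg)
        refine ⟨?_, hu⟩
        intro v hv hvS
        have hvpre := (List.mem_filter.mp hv).1
        have hvgood := (List.mem_filter.mp hv).2
        have hvne : v ≠ ∅ := hne v (by simp [hvpre])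
        have hvS' : v ≠ S := fun h => hSpre (h ▸ hvpre)
        have hvu : uniq v = true := Bool.and_elim_left (by unfold goodB at hvgood; exact hvgood)
        unfold goodB at hg
        simp only [hu, Bool.true_and, decide_eq_true_eq] at hg
        have := hg v (Finset.mem_powerset.mpr hvS) hvS' hvne
        rw [hvu] at this
        exact absurd this (by decide)
    rw [List.foldl_cons]
    have hstep : absStep uniq (n, pre.filter (goodB uniq)) S
        = (n + (if goodB uniq S = true then 1 else 0), (pre ++ [S]).filter (goodB uniq)) := by
      unfold absStep
      by_cases hg : goodB uniq S = true
      · rw [if_pos (hkey.mpr hg), if_pos hg]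
        simp [List.filter_append, hg]
      · have hgf : goodB uniq S = false := Bool.eq_false_iff.mpr hg
        rw [if_neg (fun hc => hg (hkey.mp hc)), if_neg hg]
        simp [List.filter_append, hgf]
    rw [hstep]
    have hrec := ih (pre ++ [S]) (n + (if goodB uniq S = true then 1 else 0))
      (by simpa using hnd)
      (by intro x hx; exact hne x (by simpa [List.append_assoc] using hx))
      (by
        intro k hk T hT hTne2
        have h := hcl (k+1) (by simpa using hk) T (by simpa using hT) hTne2
        simpa [List.take_succ_cons, List.append_assoc] using h)
    rw [hrec]
    by_cases hg : goodB uniq S = true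
    · simp [hg, List.append_assoc]
      omega
    · have hgf : goodB uniq S = false := Bool.eq_false_iff.mpr hg
      simp [hgf, List.append_assoc]

-- a sublist of a nodup list is recovered by filtering membership
lemma filter_mem_of_sublist : ∀ {l c : List Int}, l.Nodup → c.Sublist l →
    l.filter (fun i => decide (i ∈ c.toFinset)) = c := by
  intro l
  induction l with
  | nil => intro c _ hs; simp [List.sublist_nil.mp hs]
  | cons x l ih =>
    intro c hnd hs
    rcases List.sublist_cons_iff.mp hs with h | ⟨c', rfl, hc'⟩
    · have hxl : x ∉ l := (List.nodup_cons.mp hnd).1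
      have hxc : x ∉ c := fun hx => hxl (h.mem hx)
      rw [List.filter_cons_of_neg (by simp [hxc])]
      exact ih (List.nodup_cons.mp hnd).2 h
    · have hxl : x ∉ l := (List.nodup_cons.mp hnd).1
      have htl : l.filter (fun i => decide (i ∈ (x :: c').toFinset)) = l.filter (fun i => decide (i ∈ c'.toFinset)) :=
        List.filter_congr (fun a ha => by
          have hax : a ≠ x := fun h => hxl (h ▸ ha)
          simp [hax])
      rw [List.filter_cons_of_pos (by simp), htl, ih (List.nodup_cons.mp hnd).2 hc']

lemma nodup_castRange (M : Nat) : (castRange M).Nodup := by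
  exact (List.nodup_range).map_on (fun x _ y _ h => by exact_mod_cast h)

lemma nodup_combinations {α : Type} [DecidableEq α] :
    ∀ (xs : List α) (r : Nat), xs.Nodup → (PySem.List.combinations xs r).Nodup := by
  intro xs r
  induction xs generalizing r with
  | nil => cases r <;> simp [PySem.List.combinations_zero, PySem.List.combinations_nil_succ]
  | cons x xs ih =>
    intro hnd
    cases r with
    | zero => simp [PySem.List.combinations_zero]
    | succ r =>
      rw [PySem.List.combinations_cons_succ, List.nodup_append]
      refine ⟨?_, ih _ (List.nodup_cons.mp hnd).2, ?_⟩
      · exact (ih _ (List.nodup_cons.mp hnd).2).map_on (fun a _ b _ h => by simpa using h)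
      · rintro a ha b hb rfl
        obtain ⟨c, hc, rfl⟩ := List.mem_map.mp ha
        have := (PySem.List.mem_combinations_iff _ _ _).mp hb
        exact (List.nodup_cons.mp hnd).1 (this.1.mem (by simp))

-- position lemma: an element of smaller grade sits in the prefix
lemma mem_take_of_lt_grade {α : Type} (g : α → Nat) {l : List α}
    (h : l.Pairwise (fun a b => g a ≤ g b)) {y : α} (hy : y ∈ l) {k : Nat} (hk : k < l.length)
    (hlt : g y < g l[k]) : y ∈ l.take k := by
  obtain ⟨j, hj, rfl⟩ := List.mem_iff_getElem.mp hy
  rcases lt_trichotomy j k with hjk | rfl | hkj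
  · exact List.mem_iff_getElem.mpr ⟨j, by simp [List.length_take]; omega, List.getElem_take⟩
  · omega
  · have := List.pairwise_iff_getElem.mp h k j hk hj hkj
    omega

-- ===== bit-level facts =====
lemma tb_eq (m i : Nat) : ((m >>> i) &&& 1 == 1) = Nat.testBit m i := by
  unfold Nat.testBit
  rw [Nat.and_one_is_mod, Nat.one_and_eq_mod_two]
  rcases Nat.mod_two_eq_zero_or_one (m >>> i) with h | h <;> simp [h]

lemma mem_maskSet (M mask : Nat) (j : Int) :
    j ∈ maskSet M mask ↔ ∃ i : Nat, i < M ∧ Nat.testBit mask i = true ∧ j = (i : Int) := by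
  simp only [maskSet, List.mem_toFinset, List.mem_map, List.mem_filter, List.mem_range, tb_eq]
  constructor
  · rintro ⟨i, ⟨hi, hb⟩, rfl⟩; exact ⟨i, hi, hb, rfl⟩
  · rintro ⟨i, hi, hb, rfl⟩; exact ⟨i, ⟨hi, hb⟩, rfl⟩

lemma testBit_false_of_lt {m i M : Nat} (h : m < 2^M) (hMi : M ≤ i) : Nat.testBit m i = false :=
  Nat.testBit_lt_two_pow (lt_of_lt_of_le h (Nat.pow_le_pow_right (by norm_num) hMi))

lemma testBit_iff_mem {M m i : Nat} (hiM : i < M) :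
    Nat.testBit m i = true ↔ (i : Int) ∈ maskSet M m := by
  constructor
  · intro hb; exact (mem_maskSet M m _).mpr ⟨i, hiM, hb, rfl⟩
  · intro hj
    obtain ⟨i', hi', hb', he⟩ := (mem_maskSet M m _).mp hj
    have : i' = i := by exact_mod_cast he.symm
    exact this ▸ hb'

lemma sum_bits_lt : ∀ (M : Nat) (p : Nat → Bool),
    (((List.range M).filter p).map (fun i => 2^i)).sum < 2^M := by
  intro M p
  induction M with
  | zero => simp
  | succ M ih =>
    rw [List.range_succ, List.filter_append, List.map_append, List.sum_append]
    have h2 : ((List.filter p [M]).map (fun i => 2^i)).sum ≤ 2^M := by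
      cases hp : p M <;> simp [hp]
    rw [pow_succ]; omega

lemma testBit_sum_bits (M : Nat) (p : Nat → Bool) (i : Nat) :
    Nat.testBit ((((List.range M).filter p).map (fun i => 2^i)).sum) i = (p i && decide (i < M)) := by
  induction M with
  | zero => simp
  | succ M ih =>
    rw [List.range_succ, List.filter_append, List.map_append, List.sum_append]
    cases hp : p M with
    | false =>
      have hnil : ((List.filter p [M]).map (fun i => 2^i)).sum = 0 := by simp [hp]
      rw [hnil, Nat.add_zero, ih]
      by_cases him : i = M
      · subst him; simp [hp]
      · rw [decide_eq_decide.mpr (by omega : (i < M) ↔ (i < M + 1))]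
    | true =>
      have hone : ((List.filter p [M]).map (fun i => 2^i)).sum = 2^M := by simp [hp]
      rw [hone, Nat.add_comm]
      rcases lt_trichotomy i M with hi | rfl | hi
      · rw [Nat.testBit_two_pow_add_gt hi, ih,
          decide_eq_decide.mpr (by omega : (i < M) ↔ (i < M + 1))]
      · rw [Nat.testBit_two_pow_add_eq, Nat.testBit_lt_two_pow (sum_bits_lt i p)]
        simp [hp]
      · have hlt : 2 ^ M + (((List.range M).filter p).map (fun i => 2^i)).sum < 2 ^ i := by
          have h1 := sum_bits_lt M p
          have h2 : (2:Nat)^(M+1) ≤ 2^i := Nat.pow_le_pow_right (by norm_num) (by omega)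
          rw [pow_succ] at h2; omega
        rw [Nat.testBit_lt_two_pow hlt]
        simp [show ¬ (i < M + 1) by omega]

lemma testBit_maskOf (M : Nat) (T : Finset Int) (i : Nat) :
    Nat.testBit (maskOf M T) i = (decide ((i : Int) ∈ T) && decide (i < M)) :=
  testBit_sum_bits M _ i

lemma maskOf_lt (M : Nat) (T : Finset Int) : maskOf M T < 2^M := sum_bits_lt M _

lemma maskSet_maskOf {M : Nat} {T : Finset Int} (hT : ∀ j ∈ T, ∃ i : Nat, i < M ∧ j = (i : Int)) :
    maskSet M (maskOf M T) = T := by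
  ext j
  constructor
  · intro hj
    obtain ⟨i, hiM, hbit, rfl⟩ := (mem_maskSet M _ j).mp hj
    rw [testBit_maskOf] at hbit
    exact of_decide_eq_true (Bool.and_elim_left hbit)
  · intro hj
    obtain ⟨i, hiM, rfl⟩ := hT j hj
    refine (mem_maskSet M _ _).mpr ⟨i, hiM, ?_, rfl⟩
    rw [testBit_maskOf]; simp [hj, hiM]

lemma maskOf_pos {M : Nat} {T : Finset Int} (hne : T ≠ ∅)
    (hT : ∀ j ∈ T, ∃ i : Nat, i < M ∧ j = (i : Int)) : 1 ≤ maskOf M T := by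
  obtain ⟨j, hj⟩ := Finset.nonempty_iff_ne_empty.mpr hne
  obtain ⟨i, hiM, rfl⟩ := hT j hj
  have hbit : Nat.testBit (maskOf M T) i = true := by
    rw [testBit_maskOf]; simp [hj, hiM]
  rw [Nat.one_le_iff_ne_zero]
  intro h0
  rw [h0, Nat.zero_testBit] at hbit
  exact Bool.false_ne_true hbit

lemma maskSet_inj {M a b : Nat} (ha : a < 2^M) (hb : b < 2^M) (h : maskSet M a = maskSet M b) :
    a = b := by
  apply Nat.eq_of_testBit_eq
  intro i
  by_cases hiM : i < M
  · rw [Bool.eq_iff_iff, (testBit_iff_mem hiM : Nat.testBit a i = true ↔ _),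
      (testBit_iff_mem hiM : Nat.testBit b i = true ↔ _), h]
  · rw [testBit_false_of_lt ha (by omega), testBit_false_of_lt hb (by omega)]

lemma maskSet_eq_empty_iff {M m : Nat} (h2 : m < 2^M) : maskSet M m = ∅ ↔ m = 0 := by
  constructor
  · intro hemp
    apply Nat.eq_of_testBit_eq
    intro i
    rw [Nat.zero_testBit]
    by_cases hiM : i < M
    · by_contra hb
      have := (testBit_iff_mem hiM).mp (by simpa using hb)
      rw [hemp] at this
      exact absurd this (Finset.notMem_empty _)
    · exact testBit_false_of_lt h2 (by omega)
  · intro h0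
    subst h0
    ext j
    simp only [mem_maskSet, Nat.zero_testBit, Finset.notMem_empty, iff_false]
    rintro ⟨i, _, hb, _⟩
    exact Bool.false_ne_true hb

lemma maskSet_nonempty {M m : Nat} (h1 : 1 ≤ m) (h2 : m < 2^M) : maskSet M m ≠ ∅ := by
  intro hemp
  have := (maskSet_eq_empty_iff h2).mp hemp
  omega

lemma maskSet_sub_range (M m : Nat) : ∀ j ∈ maskSet M m, ∃ i : Nat, i < M ∧ j = (i : Int) := by
  intro j hj
  obtain ⟨i, hi, _, rfl⟩ := (mem_maskSet M m j).mp hj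
  exact ⟨i, hi, rfl⟩

-- ===== properties of the two enumerations =====
lemma card_of_mem_comb {M : Nat} {r : Nat} {c : List Int}
    (hc : c ∈ PySem.List.combinations (castRange M) r) : c.toFinset.card = r ∧ c.Sublist (castRange M) := by
  obtain ⟨hsub, hlen⟩ := (PySem.List.mem_combinations_iff _ _ _).mp hc
  exact ⟨by rw [List.toFinset_card_of_nodup (hsub.nodup (nodup_castRange M)), hlen], hsub⟩

lemma mem_castRange (M : Nat) (j : Int) : j ∈ castRange M ↔ ∃ i : Nat, i < M ∧ j = (i : Int) := by
  simp only [castRange, List.mem_map, List.mem_range]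
  constructor
  · rintro ⟨i, hi, rfl⟩; exact ⟨i, hi, rfl⟩
  · rintro ⟨i, hi, rfl⟩; exact ⟨i, hi, rfl⟩

lemma length_castRange (M : Nat) : (castRange M).length = M := by simp [castRange]

lemma nodup_bigA (M : Nat) : (bigA M).Nodup := by
  rw [bigA, List.nodup_flatMap]
  refine ⟨fun num _ => nodup_combinations _ _ (nodup_castRange M), ?_⟩
  rw [List.pairwise_iff_getElem]
  intro i j hi hj hij c hci hcj
  have e1 := ((PySem.List.mem_combinations_iff _ _ _).mp hci).2
  have e2 := ((PySem.List.mem_combinations_iff _ _ _).mp hcj).2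
  rw [PySem.List.getElem_pyRange_one] at e1 e2
  omega

lemma nodup_listA (M : Nat) : (listA M).Nodup := by
  apply List.Nodup.map_on _ (nodup_bigA M)
  intro x hx y hy hxy
  obtain ⟨numx, _, hxc⟩ := List.mem_flatMap.mp hx
  obtain ⟨numy, _, hyc⟩ := List.mem_flatMap.mp hy
  have hxs := ((PySem.List.mem_combinations_iff _ _ _).mp hxc).1
  have hys := ((PySem.List.mem_combinations_iff _ _ _).mp hyc).1
  rw [← filter_mem_of_sublist (nodup_castRange M) hxs, ← filter_mem_of_sublist (nodup_castRange M) hys, hxy]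

lemma pairwise_grade_listA (M : Nat) : (listA M).Pairwise (fun a b => a.card ≤ b.card) := by
  rw [listA, List.pairwise_map, bigA, List.pairwise_flatMap]
  constructor
  · intro num _
    apply List.pairwise_of_forall_mem_list
    intro a ha b hb
    rw [(card_of_mem_comb ha).1, (card_of_mem_comb hb).1]
  · apply (PySem.List.pairwise_lt_pyRange_one 1 ((M:Int)+1)).imp
    intro n1 n2 h12 x hx y hy
    rw [(card_of_mem_comb hx).1, (card_of_mem_comb hy).1]
    exact Int.toNat_le_toNat h12.le

lemma nonempty_listA (M : Nat) : ∀ S ∈ listA M, S ≠ ∅ := by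
  intro S hS
  obtain ⟨c, hc, rfl⟩ := List.mem_map.mp hS
  obtain ⟨num, hnum, hcomb⟩ := List.mem_flatMap.mp hc
  have hnum1 := (PySem.List.mem_pyRange_one.mp hnum).1
  have hlen := ((PySem.List.mem_combinations_iff _ _ _).mp hcomb).2
  intro hemp
  rw [List.toFinset_eq_empty_iff] at hemp
  subst hemp
  simp at hlen
  omega

lemma listA_of_subset {M : Nat} {T : Finset Int} (hne : T ≠ ∅)
    (hsub : ∀ j ∈ T, ∃ i : Nat, i < M ∧ j = (i : Int)) : T ∈ listA M := by
  have hcT : ((castRange M).filter (fun i => decide (i ∈ T))).Sublist (castRange M) := List.filter_sublist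
  have hnd : ((castRange M).filter (fun i => decide (i ∈ T))).Nodup := hcT.nodup (nodup_castRange M)
  have hfin : ((castRange M).filter (fun i => decide (i ∈ T))).toFinset = T := by
    ext j
    simp only [List.mem_toFinset, List.mem_filter, decide_eq_true_eq]
    constructor
    · exact fun h => h.2
    · intro hj
      exact ⟨(mem_castRange M j).mpr (hsub j hj), hj⟩
  have hlen : ((castRange M).filter (fun i => decide (i ∈ T))).length = T.card := by
    have h := List.toFinset_card_of_nodup hnd
    rw [hfin] at h
    exact h.symm
  have hcard1 : 1 ≤ T.card := Finset.card_pos.mpr (Finset.nonempty_iff_ne_empty.mpr hne)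
  have hcardM : T.card ≤ M := by
    have := hcT.length_le
    rw [hlen, length_castRange] at this
    omega
  refine List.mem_map.mpr ⟨_, List.mem_flatMap.mpr ⟨(T.card : Int), ?_, ?_⟩, hfin⟩
  · rw [PySem.List.mem_pyRange_one]
    exact ⟨by exact_mod_cast hcard1, by omega⟩
  · rw [PySem.List.mem_combinations_iff]
    exact ⟨hcT, by rw [hlen]; simp⟩

lemma hcl_listA (M : Nat) : ∀ (k : Nat) (hk : k < (listA M).length),
    ∀ T, T ⊂ (listA M)[k] → T ≠ ∅ → T ∈ (listA M).take k := by
  intro k hk T hTS hTne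
  have hkA : k < (bigA M).length := by simpa [listA] using hk
  have hgetA : (listA M)[k] = (bigA M)[k].toFinset := by simp [listA]
  have hc : (bigA M)[k] ∈ bigA M := List.getElem_mem hkA
  obtain ⟨num, hnum, hcomb⟩ := List.mem_flatMap.mp hc
  have hsubl := (card_of_mem_comb hcomb).2
  rw [hgetA] at hTS
  have hsub : ∀ j ∈ T, ∃ i : Nat, i < M ∧ j = (i : Int) := by
    intro j hj
    exact (mem_castRange M j).mp (hsubl.mem (List.mem_toFinset.mp (hTS.subset hj)))
  apply mem_take_of_lt_grade (fun S => S.card) (pairwise_grade_listA M)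
    (listA_of_subset hTne hsub) hk
  rw [hgetA]
  exact Finset.card_lt_card hTS

lemma mem_listA (M : Nat) (S : Finset Int) :
    S ∈ listA M ↔ S ≠ ∅ ∧ ∀ j ∈ S, ∃ i : Nat, i < M ∧ j = (i : Int) := by
  constructor
  · intro hS
    refine ⟨nonempty_listA M S hS, ?_⟩
    obtain ⟨c, hc, rfl⟩ := List.mem_map.mp hS
    obtain ⟨num, _, hcomb⟩ := List.mem_flatMap.mp hc
    intro j hj
    exact (mem_castRange M j).mp ((card_of_mem_comb hcomb).2.mem (List.mem_toFinset.mp hj))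
  · rintro ⟨hne, hsub⟩
    exact listA_of_subset hne hsub

lemma mem_range'_listB {M m : Nat} (h : m ∈ List.range' 1 (2^M - 1)) : 1 ≤ m ∧ m < 2^M := by
  have h2 : (1:Nat) ≤ 2^M := Nat.one_le_two_pow
  have := List.mem_range'_1.mp h
  omega

lemma nodup_listB (M : Nat) : (listB M).Nodup := by
  apply List.Nodup.map_on
  · intro a ha b hb hab
    exact maskSet_inj (mem_range'_listB ha).2 (mem_range'_listB hb).2 hab
  · exact List.nodup_range' 1

lemma mem_listB (M : Nat) (S : Finset Int) :
    S ∈ listB M ↔ S ≠ ∅ ∧ ∀ j ∈ S, ∃ i : Nat, i < M ∧ j = (i : Int) := by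
  constructor
  · intro hS
    obtain ⟨m, hm, rfl⟩ := List.mem_map.mp hS
    exact ⟨maskSet_nonempty (mem_range'_listB hm).1 (mem_range'_listB hm).2, maskSet_sub_range M m⟩
  · rintro ⟨hne, hsub⟩
    have h2 : (1:Nat) ≤ 2^M := Nat.one_le_two_pow
    have ht1 : 1 ≤ maskOf M S := maskOf_pos hne hsub
    have htlt : maskOf M S < 2^M := maskOf_lt M S
    refine List.mem_map.mpr ⟨maskOf M S, List.mem_range'_1.mpr (by omega), maskSet_maskOf hsub⟩

lemma perm_listA_listB (M : Nat) : (listA M).Perm (listB M) := by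
  rw [List.perm_ext_iff_of_nodup (nodup_listA M) (nodup_listB M)]
  intro S
  rw [mem_listA, mem_listB]

-- ===== the A-side simulation =====
lemma ofList_sublist {α : Type} [BEq α] [LawfulBEq α] : ∀ (l : List α), (PySem.Set.ofList l).Sublist l := by
  intro l
  induction l using List.reverseRecOn with
  | nil => simp [PySem.Set.ofList_nil]
  | append_singleton xs x ih =>
    rw [PySem.Set.ofList_append_singleton, PySem.Set.add_eq_ite]
    split
    · exact ih.trans (List.sublist_append_left xs [x])
    · exact ih.append (List.Sublist.refl [x])

lemma ofList_len_eq_iff {α : Type} [BEq α] [LawfulBEq α] {l : List α} :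
    (PySem.Set.ofList l).length = l.length ↔ l.Nodup := by
  constructor
  · intro h
    have := (ofList_sublist l).eq_of_length h
    rw [← this]; exact PySem.Set.nodup_ofList l
  · intro h; rw [PySem.Set.ofList_eq_self_of_nodup l h]

lemma set_len_eq {α : Type} (s : PySem.Set α) : PySem.Set.len s = (s.length : Int) := rfl

lemma subset_toFinset_iff (v c : List Int) : v.toFinset ⊆ c.toFinset ↔ ∀ x ∈ v, x ∈ c := by
  simp [Finset.subset_iff, List.mem_toFinset]

lemma isMin_iff (c : List Int) (vis : List (PySem.Set Int)) :
    isMinimality c vis = true ↔ ∀ v ∈ vis.map List.toFinset, ¬ v ⊆ c.toFinset := by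
  unfold isMinimality
  rw [List.all_eq_true, List.forall_mem_map]
  refine forall₂_congr ?_
  intro v _
  rw [Bool.not_eq_true', Bool.eq_false_iff]
  apply not_congr
  rw [beq_iff_eq, set_len_eq,
    (Int.natCast_eq_zero : ((PySem.Set.diff v (PySem.Set.ofList c)).length : Int) = 0 ↔ _),
    List.length_eq_zero_iff, List.eq_nil_iff_forall_not_mem, subset_toFinset_iff]
  constructor
  · intro h x hxv
    by_contra hxc
    exact h x ((PySem.Set.mem_diff v (PySem.Set.ofList c) x).mpr
      ⟨hxv, fun hm => hxc ((PySem.Set.mem_ofList c x).mp hm)⟩)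
  · intro h x hx
    obtain ⟨hxv, hxnc⟩ := (PySem.Set.mem_diff v (PySem.Set.ofList c) x).mp hx
    exact hxnc ((PySem.Set.mem_ofList c x).mpr (h x hxv))

lemma proj_foldl (c : List Int) (r : List String) :
    c.foldl (fun value i => value ++ [PySem.List.pyGetD r i ""]) [] = c.map (fun i => PySem.List.pyGetD r i "") := by
  simpa using PySem.List.foldl_append_singleton_eq_map (fun i => PySem.List.pyGetD r i "") c []

lemma data_eq (relation : List (List String)) (c : List Int) :
    relation.foldl (fun data r =>
        PySem.Set.add data (c.foldl (fun value i => value ++ [PySem.List.pyGetD r i ""]) [])) PySem.Set.empty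
      = PySem.Set.ofList (relation.map (fun r => c.map (fun i => PySem.List.pyGetD r i ""))) := by
  rw [PySem.Set.ofList_eq_foldl, List.foldl_map]
  simp only [proj_foldl]
  rfl

lemma lenCheck_eq (relation : List (List String)) (M : Nat) (S : Finset Int) :
    (PySem.Set.len (PySem.Set.ofList (relation.map (projR M S))) == (relation.length : Int)) = uniqR relation M S := by
  rw [Bool.eq_iff_iff, beq_iff_eq, set_len_eq, uniqR, decide_eq_true_eq]
  rw [show ((relation.length : Int)) = (((relation.map (projR M S)).length : Nat) : Int) by simp]
  rw [Int.natCast_inj]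
  exact ofList_len_eq_iff

lemma isUniq_eq {M : Nat} {c : List Int} (relation : List (List String)) (hsub : c.Sublist (castRange M)) :
    isUniqueness c relation (relation.length : Int) = uniqR relation M c.toFinset := by
  have hproj : (fun r => c.map (fun i => PySem.List.pyGetD r i "")) = projR M c.toFinset := by
    funext r
    unfold projR
    rw [filter_mem_of_sublist (nodup_castRange M) hsub]
  unfold isUniqueness
  rw [data_eq relation c, hproj, lenCheck_eq]

lemma ofList_toFinset (c : List Int) : (PySem.Set.ofList c).toFinset = c.toFinset := by
  ext x
  simp [List.mem_toFinset, PySem.Set.mem_ofList]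

lemma sim_A (relation : List (List String)) :
    (solution relation = ((listA ((relation.headD []).length)).foldl
      (absStep (uniqR relation ((relation.headD []).length))) (0, [])).1) := by
  have hM : PySem.List.pyGetD relation 0 [] = relation.headD [] := by
    cases relation <;> simp [pysem]
  have hsim := foldl_sim
    (fun (st : Int × List (PySem.Set Int)) combi =>
      if !(isMinimality combi st.2) then st
      else if isUniqueness combi relation ((relation.length : Nat) : Int) then
        (st.1 + 1, st.2 ++ [PySem.Set.ofList combi]) else st)
    (absStep (uniqR relation ((relation.headD []).length)))
    List.toFinset
    (fun s t => t = (s.1, s.2.map List.toFinset))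
    (bigA ((relation.headD []).length)) ((0 : Int), ([] : List (PySem.Set Int))) ((0 : Int), ([] : List (Finset Int)))
    rfl
    (by
      intro c hc s t ht
      subst ht
      obtain ⟨num, _, hcomb⟩ := List.mem_flatMap.mp hc
      have hsub := ((PySem.List.mem_combinations_iff _ _ _).mp hcomb).1
      by_cases hmin : isMinimality c s.2 = true
      · by_cases huq : isUniqueness c relation ((relation.length : Nat) : Int) = true
        · have hcond : (∀ v ∈ s.2.map List.toFinset, ¬ v ⊆ c.toFinset) ∧
              uniqR relation ((relation.headD []).length) c.toFinset = true :=
            ⟨(isMin_iff c s.2).mp hmin, by rw [← isUniq_eq relation hsub]; exact huq⟩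
          rw [absStep, if_pos hcond]
          simp [hmin, huq, ofList_toFinset]
        · rw [absStep, if_neg (fun hcond => absurd (by
            rw [isUniq_eq relation hsub]; exact hcond.2) huq)]
          simp [hmin, huq]
      · rw [absStep, if_neg (fun hcond => hmin ((isMin_iff c s.2).mpr hcond.1))]
        simp [hmin])
  dsimp only at hsim
  show (List.foldl
      (fun st num =>
        List.foldl
          (fun st combi =>
            if !(isMinimality combi st.2) then st
            else if isUniqueness combi relation ((relation.length : Nat) : Int) then (st.1 + 1, st.2 ++ [PySem.Set.ofList combi]) else st)
          st (PySem.List.combinations (PySem.List.pyRange 0 (((PySem.List.pyGetD relation 0 []).length : Nat) : Int)) num.toNat))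
      ((0 : Int), ([] : List (PySem.Set Int))) (PySem.List.pyRange 1 ((((PySem.List.pyGetD relation 0 []).length : Nat) : Int) + 1))).1
    = (List.foldl (absStep (uniqR relation ((relation.headD []).length))) (0, []) (listA ((relation.headD []).length))).1
  rw [hM, PySem.List.pyRange_zero_nat, ← List.foldl_flatMap]
  rw [show (List.flatMap (fun num => PySem.List.combinations ((List.range ((relation.headD []).length)).map (fun k : Nat => (k : Int))) num.toNat) (PySem.List.pyRange 1 (((relation.headD []).length : Int) + 1))) = bigA ((relation.headD []).length) from rfl]
  unfold listA
  rw [hsim]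

-- ===== the B side: pairwise characterisation of uniqueness =====

-- 'PW relation M S': every pair of rows is separated by a column of S (below M)
def PW (relation : List (List String)) (M : Nat) (S : Finset Int) : Prop :=
  ∀ a b : Nat, a < b → b < relation.length →
    ∃ i : Nat, i < M ∧ (i : Int) ∈ S ∧ (relation.getD a []).getD i "" ≠ (relation.getD b []).getD i ""

lemma PW_mono {relation : List (List String)} {M : Nat} {S T : Finset Int}
    (hST : S ⊆ T) (h : PW relation M S) : PW relation M T := by
  intro a b hab hb
  obtain ⟨i, h1, h2, h3⟩ := h a b hab hb
  exact ⟨i, h1, hST h2, h3⟩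

lemma projR_ne_iff (M : Nat) (S : Finset Int) (r r' : List String) :
    projR M S r ≠ projR M S r' ↔
      ∃ i : Nat, i < M ∧ (i : Int) ∈ S ∧ r.getD i "" ≠ r'.getD i "" := by
  unfold projR
  rw [Ne, List.map_inj_left]
  push Not
  constructor
  · rintro ⟨x, hx, hne⟩
    obtain ⟨hxc, hxS⟩ := List.mem_filter.mp hx
    obtain ⟨i, hiM, rfl⟩ := (mem_castRange M x).mp hxc
    refine ⟨i, hiM, by simpa using hxS, ?_⟩
    simpa [PySem.List.pyGetD_natCast] using hne
  · rintro ⟨i, hiM, hiS, hne⟩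
    refine ⟨(i : Int), List.mem_filter.mpr ⟨(mem_castRange M _).mpr ⟨i, hiM, rfl⟩, by simpa using hiS⟩, ?_⟩
    simpa [PySem.List.pyGetD_natCast] using hne

lemma uniqR_iff_PW (relation : List (List String)) (M : Nat) (S : Finset Int) :
    uniqR relation M S = true ↔ PW relation M S := by
  rw [uniqR, decide_eq_true_eq, List.Nodup, List.pairwise_iff_getElem]
  constructor
  · intro h a b hab hb
    have ha : a < relation.length := lt_trans hab hb
    have := h a b (by simpa using ha) (by simpa using hb) hab
    rw [List.getElem_map, List.getElem_map] at this
    rw [← (projR_ne_iff M S _ _)]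
    rwa [List.getD_eq_getElem relation [] ha, List.getD_eq_getElem relation [] hb]
  · intro h a b ha hb hab
    rw [List.length_map] at ha hb
    rw [List.getElem_map, List.getElem_map]
    rw [← List.getD_eq_getElem relation [] ha, ← List.getD_eq_getElem relation [] hb]
    exact (projR_ne_iff M S _ _).mpr (h a b hab hb)

-- diffsOf as a flat list of the pair masks
lemma diffsOf_eq (relation : List (List String)) (N M : Nat) :
    diffsOf relation N M
      = (List.range N).flatMap (fun a => (List.range' (a+1) (N - (a+1))).map (fun b => diffNat relation M a b)) := by
  unfold diffsOf
  simp only [PySem.List.foldl_append_singleton_eq_map]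
  simpa using PySem.List.foldl_append_eq_flatMap
    (fun a => (List.range' (a+1) (N - (a+1))).map (fun b => diffNat relation M a b)) (List.range N) []

lemma mem_diffsOf (relation : List (List String)) (N M d : Nat) :
    d ∈ diffsOf relation N M ↔ ∃ a b : Nat, a < b ∧ b < N ∧ d = diffNat relation M a b := by
  rw [diffsOf_eq]
  simp only [List.mem_flatMap, List.mem_map, List.mem_range, List.mem_range'_1]
  constructor
  · rintro ⟨a, haN, b, ⟨hab, hbN⟩, rfl⟩
    exact ⟨a, b, by omega, by omega, rfl⟩
  · rintro ⟨a, b, hab, hbN, rfl⟩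
    exact ⟨a, by omega, b, ⟨by omega, by omega⟩, rfl⟩

-- bit j of a fold that ORs in 2^i for qualifying i
lemma testBit_foldl_or (q : Nat → Bool) :
    ∀ (M d0 j : Nat),
      Nat.testBit ((List.range M).foldl (fun d i => if q i then d ||| (1 <<< i) else d) d0) j
        = (Nat.testBit d0 j || (q j && decide (j < M))) := by
  intro M
  induction M with
  | zero => intro d0 j; simp
  | succ M ih =>
    intro d0 j
    rw [List.range_succ, List.foldl_append, List.foldl_cons, List.foldl_nil]
    cases hq : q M with
    | false =>
      rw [if_neg (by simp [hq]), ih]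
      by_cases hj : j = M
      · subst hj; simp [hq]
      · by_cases hjM : j < M
        · simp [hjM, show j < M + 1 by omega]
        · simp [hjM, show ¬ (j < M + 1) by omega]
    | true =>
      rw [if_pos (by simp [hq]), Nat.testBit_or, ih, Nat.shiftLeft_eq, one_mul]
      by_cases hj : j = M
      · subst hj
        simp [hq, Nat.testBit_two_pow_self]
      · rw [Nat.testBit_two_pow_of_ne (fun h => hj h.symm)]
        by_cases hjM : j < M
        · simp [hjM, show j < M + 1 by omega]
        · simp [hjM, show ¬ (j < M + 1) by omega]

lemma testBit_diffNat (relation : List (List String)) (M a b j : Nat) :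
    Nat.testBit (diffNat relation M a b) j
      = (((relation.getD a []).getD j "" != (relation.getD b []).getD j "") && decide (j < M)) := by
  unfold diffNat
  rw [testBit_foldl_or, Nat.zero_testBit, Bool.false_or]

lemma ne_zero_iff_testBit (m : Nat) : m ≠ 0 ↔ ∃ j, Nat.testBit m j = true := by
  constructor
  · intro h
    by_contra hc
    push Not at hc
    exact h (Nat.eq_of_testBit_eq (fun j => by
      rw [Nat.zero_testBit]
      exact Bool.eq_false_iff.mpr (fun ht => absurd ht (by simpa using hc j))))
  · rintro ⟨j, hj⟩ rfl
    rw [Nat.zero_testBit] at hj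
    exact Bool.false_ne_true hj

lemma and_ne_zero_iff (mask d : Nat) :
    mask &&& d ≠ 0 ↔ ∃ j, Nat.testBit mask j = true ∧ Nat.testBit d j = true := by
  rw [ne_zero_iff_testBit]
  refine exists_congr (fun j => ?_)
  rw [Nat.testBit_and, Bool.and_eq_true_iff]

lemma uniqueB_iff (relation : List (List String)) (M mask : Nat) :
    uniqueB (diffsOf relation relation.length M) mask = true ↔ PW relation M (maskSet M mask) := by
  unfold uniqueB PW
  rw [List.all_eq_true]
  constructor
  · intro h a b hab hb
    have hd := h (diffNat relation M a b)
      ((mem_diffsOf relation relation.length M _).mpr ⟨a, b, hab, hb, rfl⟩)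
    have hne : mask &&& diffNat relation M a b ≠ 0 := by simpa using hd
    obtain ⟨j, hm, hdj⟩ := (and_ne_zero_iff _ _).mp hne
    rw [testBit_diffNat] at hdj
    obtain ⟨hs, hjM⟩ := Bool.and_eq_true_iff.mp hdj
    have hjM' : j < M := of_decide_eq_true hjM
    exact ⟨j, hjM', (testBit_iff_mem hjM').mp hm, bne_iff_ne.mp hs⟩
  · intro h d hd
    obtain ⟨a, b, hab, hb, rfl⟩ := (mem_diffsOf relation relation.length M d).mp hd
    obtain ⟨i, hiM, hiS, hne⟩ := h a b hab hb
    have : mask &&& diffNat relation M a b ≠ 0 := by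
      refine (and_ne_zero_iff _ _).mpr ⟨i, (testBit_iff_mem hiM).mpr hiS, ?_⟩
      rw [testBit_diffNat]
      exact Bool.and_eq_true_iff.mpr ⟨bne_iff_ne.mpr hne, decide_eq_true hiM⟩
    simpa using this

-- removing one set bit of the mask erases that column
lemma maskSet_xor_bit {M mask i : Nat} (hiM : i < M) (hbit : Nat.testBit mask i = true) :
    maskSet M (mask ^^^ (1 <<< i)) = (maskSet M mask).erase (i : Int) := by
  ext j
  rw [mem_maskSet, Finset.mem_erase, mem_maskSet]
  constructor
  · rintro ⟨k, hkM, hb, rfl⟩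
    rw [Nat.testBit_xor, Nat.shiftLeft_eq, one_mul] at hb
    by_cases hk : k = i
    · subst hk
      rw [Nat.testBit_two_pow_self, hbit] at hb
      simp at hb
    · rw [Nat.testBit_two_pow_of_ne (fun h => hk h.symm)] at hb
      refine ⟨by exact_mod_cast hk, k, hkM, by simpa using hb, rfl⟩
  · rintro ⟨hji, k, hkM, hb, rfl⟩
    have hki : k ≠ i := fun h => hji (by exact_mod_cast h)
    refine ⟨k, hkM, ?_, rfl⟩
    rw [Nat.testBit_xor, Nat.shiftLeft_eq, one_mul,
      Nat.testBit_two_pow_of_ne (fun h => hki h.symm), hb]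
    rfl

lemma xor_bit_lt {M mask i : Nat} (hmask : mask < 2^M) (hiM : i < M) :
    mask ^^^ (1 <<< i) < 2^M := by
  refine Nat.xor_lt_two_pow hmask ?_
  rw [Nat.shiftLeft_eq, one_mul]
  exact Nat.pow_lt_pow_right (by norm_num) hiM

-- minimality of a monotone property needs only the one-column-removed subsets
lemma minimal_iff_local (relation : List (List String)) (M : Nat) (S : Finset Int) :
    (∀ T ∈ S.powerset, T ≠ S → T ≠ ∅ → uniqR relation M T = false)
      ↔ (∀ b ∈ S, S.erase b ≠ ∅ → uniqR relation M (S.erase b) = false) := by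
  constructor
  · intro h b hb hne
    refine h (S.erase b) (Finset.mem_powerset.mpr (Finset.erase_subset b S)) ?_ hne
    intro he
    apply Finset.notMem_erase b S
    rw [he]
    exact hb
  · intro h T hTp hTS hTne
    have hTsub : T ⊆ S := Finset.mem_powerset.mp hTp
    by_contra hc
    have hTu : uniqR relation M T = true := by simpa using hc
    obtain ⟨b, hbS, hbT⟩ := Finset.exists_of_ssubset (Finset.ssubset_iff_subset_ne.mpr ⟨hTsub, hTS⟩)
    have hTsub' : T ⊆ S.erase b := Finset.subset_erase.mpr ⟨hTsub, hbT⟩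
    have hu : uniqR relation M (S.erase b) = true :=
      (uniqR_iff_PW _ _ _).mpr (PW_mono hTsub' ((uniqR_iff_PW _ _ _).mp hTu))
    have hne : S.erase b ≠ ∅ := by
      intro he
      obtain ⟨x, hx⟩ := Finset.nonempty_iff_ne_empty.mpr hTne
      exact absurd (he ▸ hTsub' hx) (Finset.notMem_empty x)
    rw [h b hbS hne] at hu
    exact Bool.false_ne_true hu

-- the inner 'all' of B is exactly the local minimality test
lemma allB_iff (relation : List (List String)) (M mask : Nat) (hmask : mask < 2^M) :
    ((List.range M).all (fun i =>
        if (mask >>> i) &&& 1 == 1 then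
          !(mask ^^^ (1 <<< i) != 0 && uniqueB (diffsOf relation relation.length M) (mask ^^^ (1 <<< i)))
        else true) = true)
      ↔ (∀ b ∈ maskSet M mask, (maskSet M mask).erase b ≠ ∅ →
          uniqR relation M ((maskSet M mask).erase b) = false) := by
  rw [List.all_eq_true]
  constructor
  · intro h b hbm hne
    obtain ⟨i, hiM, hbit, rfl⟩ := (mem_maskSet M mask b).mp hbm
    have hi := h i (List.mem_range.mpr hiM)
    rw [tb_eq, if_pos hbit] at hi
    rw [← maskSet_xor_bit hiM hbit] at hne ⊢
    have hsubne : mask ^^^ (1 <<< i) ≠ 0 := by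
      intro h0
      exact hne ((maskSet_eq_empty_iff (xor_bit_lt hmask hiM)).mpr h0)
    rw [Bool.not_eq_true', Bool.and_eq_false_iff] at hi
    rcases hi with hi | hi
    · exact absurd (by simpa using hi) hsubne
    · rw [Bool.eq_false_iff, Ne, uniqueB_iff] at hi
      rw [Bool.eq_false_iff, Ne, uniqR_iff_PW]
      exact hi
  · intro h i hi
    have hiM := List.mem_range.mp hi
    rw [tb_eq]
    cases hbit : Nat.testBit mask i with
    | false => simp
    | true =>
      rw [if_pos rfl, Bool.not_eq_true', Bool.and_eq_false_iff]
      by_cases h0 : mask ^^^ (1 <<< i) = 0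
      · left; simp [h0]
      · right
        have hne : maskSet M (mask ^^^ (1 <<< i)) ≠ ∅ :=
          fun he => h0 ((maskSet_eq_empty_iff (xor_bit_lt hmask hiM)).mp he)
        rw [maskSet_xor_bit hiM hbit] at hne
        have := h (i : Int) ((mem_maskSet M mask _).mpr ⟨i, hiM, hbit, rfl⟩) hne
        rw [Bool.eq_false_iff, Ne, uniqR_iff_PW] at this
        rw [Bool.eq_false_iff, Ne, uniqueB_iff, maskSet_xor_bit hiM hbit]
        exact this

-- the per-mask test of B coincides with goodB on masks below 2^M
lemma pmask_eq_goodB (relation : List (List String)) (M mask : Nat) (hmask : mask < 2^M) :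
    ((uniqueB (diffsOf relation relation.length M) mask) &&
      ((List.range M).all (fun i =>
        if (mask >>> i) &&& 1 == 1 then
          !(mask ^^^ (1 <<< i) != 0 && uniqueB (diffsOf relation relation.length M) (mask ^^^ (1 <<< i)))
        else true)))
      = goodB (uniqR relation M) (maskSet M mask) := by
  unfold goodB
  rw [Bool.eq_iff_iff, Bool.and_eq_true_iff, Bool.and_eq_true_iff]
  constructor
  · rintro ⟨hu, hall⟩
    refine ⟨by rw [uniqR_iff_PW]; exact (uniqueB_iff relation M mask).mp hu, ?_⟩
    rw [decide_eq_true_eq]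
    exact (minimal_iff_local relation M _).mpr ((allB_iff relation M mask hmask).mp hall)
  · rintro ⟨hu, hmin⟩
    refine ⟨by rw [uniqueB_iff]; exact (uniqR_iff_PW _ _ _).mp hu, ?_⟩
    rw [decide_eq_true_eq] at hmin
    exact (allB_iff relation M mask hmask).mpr ((minimal_iff_local relation M _).mp hmin)

-- counting fold of B
lemma foldl_count2 (u w : Nat → Bool) :
    ∀ (l : List Nat) (n : Int),
      l.foldl (fun c m => if !(u m) then c else if w m then c + 1 else c) n
        = n + (l.countP (fun m => u m && w m) : Int) := by
  intro l
  induction l with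
  | nil => intro n; simp
  | cons m l ih =>
    intro n
    simp only [List.foldl_cons, List.countP_cons]
    have hstep : (if (!u m) = true then n else if w m = true then n + 1 else n)
        = n + (if (u m && w m) = true then 1 else 0) := by
      cases hu : u m <;> cases hw : w m <;> simp
    rw [hstep, ih]
    by_cases h : (u m && w m) = true <;> simp [h] <;> push_cast <;> omega

lemma sim_B (relation : List (List String)) :
    solution_alt relation
      = (((listB ((relation.headD []).length)).countP (goodB (uniqR relation ((relation.headD []).length)))) : Int) := by
  unfold solution_alt
  rw [foldl_count2, Int.zero_add, listB, List.countP_map]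
  congr 1
  apply List.countP_congr
  intro mask hmask
  have hm := mem_range'_listB hmask
  simp only [Function.comp]
  rw [pmask_eq_goodB relation ((relation.headD []).length) mask hm.2]

-- ===== VERDICT (by name: the statement is the Claim_ definition above) =====
theorem solution_spec : Claim_equal_solution := by
  intro relation _ _
  unfold Spec_solution
  have hA := abs_fold (uniqR relation ((relation.headD []).length)) (listA ((relation.headD []).length)) [] 0
    (by simpa using nodup_listA _) (by simpa using nonempty_listA _) (by simpa using hcl_listA _)
  have hperm := (perm_listA_listB ((relation.headD []).length)).countP_eq
    (goodB (uniqR relation ((relation.headD []).length)))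
  simp only [List.filter_nil, List.nil_append] at hA
  rw [sim_A relation, sim_B relation, hA, ← hperm]
  simp [List.countP_eq_length_filter]
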